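-- pv_equiv track=rewrite | github.com/HDRT-team-2/HDRT-Final-Project | research/TPP/test.py | inflate_blocked
-- ===== SOURCE A (Python) =====
-- from typing import List, Tuple, Set, Dict, Optional
--
-- def inflate_blocked(raw_blocked:Set[Tuple[int,int]], clearance:int, grid_w:int, grid_h:int) -> Set[Tuple[int,int]]:
--     out = set()
--     for (cx,cy) in raw_blocked:
--         for dx in range(-clearance, clearance+1):
--             for dy in range(-clearance, clearance+1):
--                 nx, ny = cx+dx, cy+dy
--                 if 0 <= nx < grid_w and 0 <= ny < grid_h:
--                     out.add((nx, ny))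
--     return out
-- ===== SOURCE B (Python) =====
-- def inflate_blocked(raw_blocked, clearance, grid_w, grid_h):
--     # Separable Chebyshev dilation: one pass dilating along x into a set of
--     # column seeds, then one pass dilating each distinct seed along y; overlap
--     # between nearby blocked cells collapses at the intermediate set, so the
--     # quadratic per-cell neighborhood scan disappears.
--     cols = set()
--     for (cx, cy) in raw_blocked:
--         for nx in range(max(0, cx - clearance), min(grid_w, cx + clearance + 1)):
--             cols.add((nx, cy))
--     out = set()
--     for (nx, cy) in cols:
--         for ny in range(max(0, cy - clearance), min(grid_h, cy + clearance + 1)):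
--             out.add((nx, ny))
--     return out
-- ===== Notes on version B (the rewrite author's own statement) =====
-- stated objective: alternative
-- what changed: Replaces A's single triple-nested loop (each cell scans its whole (2c+1)^2 offset square with a bounds test per point) by a separable dilation in two staged passes: dilate along x into an intermediate set of distinct column seeds, then dilate each distinct seed along y, so overlapping cells' duplicated columns are expanded only once.
import Mathlib
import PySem

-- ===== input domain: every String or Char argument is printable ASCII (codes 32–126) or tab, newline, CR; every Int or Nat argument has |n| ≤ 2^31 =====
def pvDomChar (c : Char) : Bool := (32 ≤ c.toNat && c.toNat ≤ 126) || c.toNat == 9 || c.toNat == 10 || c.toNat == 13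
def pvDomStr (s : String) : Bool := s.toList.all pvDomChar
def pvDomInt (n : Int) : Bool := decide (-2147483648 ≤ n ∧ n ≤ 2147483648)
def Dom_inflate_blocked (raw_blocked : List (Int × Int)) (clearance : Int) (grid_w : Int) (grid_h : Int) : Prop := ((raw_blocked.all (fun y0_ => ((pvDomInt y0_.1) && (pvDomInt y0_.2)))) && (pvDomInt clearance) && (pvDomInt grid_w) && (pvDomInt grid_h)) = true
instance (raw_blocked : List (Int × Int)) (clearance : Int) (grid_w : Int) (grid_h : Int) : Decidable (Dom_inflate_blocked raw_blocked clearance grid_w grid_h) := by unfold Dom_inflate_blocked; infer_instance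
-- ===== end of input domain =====

-- B replaces A's per-cell scan of the whole (2c+1)^2 square by a separable dilation:
-- one pass dilating along x into an intermediate set of column seeds, then one pass
-- dilating each distinct seed along y (objective: alternative).

-- ===== PORT A =====
-- Port of A: fold over the cells; per cell a (2c+1)^2 double loop with an in-bounds guard.
def inflate_blocked (raw_blocked : List (Int × Int)) (clearance : Int) (grid_w : Int) (grid_h : Int) : List (Int × Int) :=
  raw_blocked.foldl (fun out c =>
    (PySem.List.pyRange (-clearance) (clearance + 1) 1).foldl (fun out dx =>
      (PySem.List.pyRange (-clearance) (clearance + 1) 1).foldl (fun out dy =>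
        let nx := c.1 + dx
        let ny := c.2 + dy
        if 0 ≤ nx ∧ nx < grid_w ∧ 0 ≤ ny ∧ ny < grid_h then
          PySem.Set.add out (nx, ny)
        else out) out) out) PySem.Set.empty

-- ===== PORT B =====
-- Port of B: stage 1 dilates along x into the seed set 'cols'; stage 2 dilates each
-- distinct seed along y into the output set.
def inflate_blocked_alt (raw_blocked : List (Int × Int)) (clearance : Int) (grid_w : Int) (grid_h : Int) : List (Int × Int) :=
  let cols : PySem.Set (Int × Int) := raw_blocked.foldl (fun cols c =>
    (PySem.List.pyRange (max 0 (c.1 - clearance)) (min grid_w (c.1 + clearance + 1)) 1).foldl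
      (fun cols nx => PySem.Set.add cols (nx, c.2)) cols) PySem.Set.empty
  cols.foldl (fun out p =>
    (PySem.List.pyRange (max 0 (p.2 - clearance)) (min grid_h (p.2 + clearance + 1)) 1).foldl
      (fun out ny => PySem.Set.add out (p.1, ny)) out) PySem.Set.empty

-- ===== PRECONDITION & SPEC =====
def Spec_inflate_blocked (raw_blocked : List (Int × Int)) (clearance : Int) (grid_w : Int) (grid_h : Int) (out : List (Int × Int)) : Prop := out = inflate_blocked_alt raw_blocked clearance grid_w grid_h
instance (raw_blocked : List (Int × Int)) (clearance : Int) (grid_w : Int) (grid_h : Int) (out : List (Int × Int)) : Decidable (Spec_inflate_blocked raw_blocked clearance grid_w grid_h out) := by unfold Spec_inflate_blocked; infer_instance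

-- ===== CLAIM (what is proved, stated in full; the proofs are below) =====
def Claim_equal_inflate_blocked : Prop := ∀ (raw_blocked : List (Int × Int)) (clearance : Int) (grid_w : Int) (grid_h : Int), Dom_inflate_blocked raw_blocked clearance grid_w grid_h → Spec_inflate_blocked raw_blocked clearance grid_w grid_h (inflate_blocked raw_blocked clearance grid_w grid_h)

-- ===== LEMMAS AND PROOFS =====

-- A fold over pyRange a b with a clamp-guard on t+x equals the unguarded fold over the clamped range.
theorem foldl_range_shift_clamp {β : Type} (f : β → Int → β) (t lo hi : Int) :
    ∀ (n : Nat) (a b : Int), (b - a).toNat = n → ∀ (s : β),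
      (PySem.List.pyRange a b 1).foldl
          (fun s x => if lo ≤ t + x ∧ t + x < hi then f s (t + x) else s) s
        = (PySem.List.pyRange (max (t + a) lo) (min (t + b) hi) 1).foldl f s := by
  intro n
  induction n with
  | zero =>
      intro a b hn s
      rw [PySem.List.pyRange_one_eq_nil (by omega), PySem.List.pyRange_one_eq_nil (by omega)]
      rfl
  | succ k ih =>
      intro a b hn s
      rw [PySem.List.pyRange_one_cons (by omega)]
      simp only [List.foldl_cons]
      by_cases hg : lo ≤ t + a ∧ t + a < hi
      · rw [if_pos hg]
        have h1 : max (t + a) lo = t + a := by omega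
        rw [h1, PySem.List.pyRange_one_cons (show t + a < min (t + b) hi by omega)]
        simp only [List.foldl_cons]
        have h2 : max (t + (a + 1)) lo = t + a + 1 := by omega
        rw [ih (a + 1) b (by omega) (f s (t + a)), h2]
      · rw [if_neg hg]
        rw [ih (a + 1) b (by omega) s]
        rcases not_and_or.mp hg with hlt | hge
        · have : max (t + a) lo = max (t + (a + 1)) lo := by omega
          rw [this]
        · rw [PySem.List.pyRange_one_eq_nil (by omega), PySem.List.pyRange_one_eq_nil (by omega)]

theorem foldl_const {β γ : Type} (l : List γ) (s : β) : l.foldl (fun s _ => s) s = s := by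
  induction l generalizing s with
  | nil => rfl
  | cons x xs ih => exact ih s

-- Per cell, A's guarded double loop is the fold of Set.add over the clamped coordinate block.
theorem cell_eq (clearance grid_w grid_h : Int) (c : Int × Int) (s : PySem.Set (Int × Int)) :
    (PySem.List.pyRange (-clearance) (clearance + 1) 1).foldl (fun out dx =>
      (PySem.List.pyRange (-clearance) (clearance + 1) 1).foldl (fun out dy =>
        let nx := c.1 + dx
        let ny := c.2 + dy
        if 0 ≤ nx ∧ nx < grid_w ∧ 0 ≤ ny ∧ ny < grid_h then
          PySem.Set.add out (nx, ny)
        else out) out) s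
    = ((PySem.List.pyRange (max 0 (c.1 - clearance)) (min grid_w (c.1 + clearance + 1)) 1).flatMap
        (fun nx => (PySem.List.pyRange (max 0 (c.2 - clearance)) (min grid_h (c.2 + clearance + 1)) 1).map
          (fun ny => (nx, ny)))).foldl PySem.Set.add s := by
  have hinner : ∀ (dx : Int) (out : PySem.Set (Int × Int)),
      (PySem.List.pyRange (-clearance) (clearance + 1) 1).foldl (fun out dy =>
        if 0 ≤ c.1 + dx ∧ c.1 + dx < grid_w ∧ 0 ≤ c.2 + dy ∧ c.2 + dy < grid_h then
          PySem.Set.add out (c.1 + dx, c.2 + dy)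
        else out) out
      = if 0 ≤ c.1 + dx ∧ c.1 + dx < grid_w then
          (PySem.List.pyRange (max 0 (c.2 - clearance)) (min grid_h (c.2 + clearance + 1)) 1).foldl
            (fun out ny => PySem.Set.add out (c.1 + dx, ny)) out
        else out := by
    intro dx out
    by_cases hx : 0 ≤ c.1 + dx ∧ c.1 + dx < grid_w
    · rw [if_pos hx]
      have := foldl_range_shift_clamp
        (fun out ny => PySem.Set.add out (c.1 + dx, ny)) c.2 0 grid_h
        ((clearance + 1) - (-clearance)).toNat (-clearance) (clearance + 1) rfl out
      have hmax : max (c.2 + -clearance) 0 = max 0 (c.2 - clearance) := by omega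
      have hmin : min (c.2 + (clearance + 1)) grid_h = min grid_h (c.2 + clearance + 1) := by omega
      rw [hmax, hmin] at this
      rw [← this]
      apply PySem.List.foldl_congr_mem
      intro acc dy _
      by_cases hy : 0 ≤ c.2 + dy ∧ c.2 + dy < grid_h
      · rw [if_pos hy, if_pos ⟨hx.1, hx.2, hy.1, hy.2⟩]
      · rw [if_neg hy, if_neg (by tauto)]
    · rw [if_neg hx]
      have : ∀ dy : Int,
          (fun (out : PySem.Set (Int × Int)) (dy : Int) =>
            if 0 ≤ c.1 + dx ∧ c.1 + dx < grid_w ∧ 0 ≤ c.2 + dy ∧ c.2 + dy < grid_h then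
              PySem.Set.add out (c.1 + dx, c.2 + dy)
            else out) = fun out _ => out := by
        intro _
        funext out dy
        rw [if_neg (by tauto)]
      rw [this 0, foldl_const]
  calc (PySem.List.pyRange (-clearance) (clearance + 1) 1).foldl (fun out dx =>
        (PySem.List.pyRange (-clearance) (clearance + 1) 1).foldl (fun out dy =>
          let nx := c.1 + dx
          let ny := c.2 + dy
          if 0 ≤ nx ∧ nx < grid_w ∧ 0 ≤ ny ∧ ny < grid_h then
            PySem.Set.add out (nx, ny)
          else out) out) s
      = (PySem.List.pyRange (-clearance) (clearance + 1) 1).foldl (fun out dx =>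
          if 0 ≤ c.1 + dx ∧ c.1 + dx < grid_w then
            (PySem.List.pyRange (max 0 (c.2 - clearance)) (min grid_h (c.2 + clearance + 1)) 1).foldl
              (fun out ny => PySem.Set.add out (c.1 + dx, ny)) out
          else out) s := by
        apply PySem.List.foldl_congr_mem
        intro acc dx _
        exact hinner dx acc
    _ = (PySem.List.pyRange (max 0 (c.1 - clearance)) (min grid_w (c.1 + clearance + 1)) 1).foldl
          (fun out nx =>
            (PySem.List.pyRange (max 0 (c.2 - clearance)) (min grid_h (c.2 + clearance + 1)) 1).foldl
              (fun out ny => PySem.Set.add out (nx, ny)) out) s := by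
        have := foldl_range_shift_clamp
          (fun (out : PySem.Set (Int × Int)) nx =>
            (PySem.List.pyRange (max 0 (c.2 - clearance)) (min grid_h (c.2 + clearance + 1)) 1).foldl
              (fun out ny => PySem.Set.add out (nx, ny)) out) c.1 0 grid_w
          ((clearance + 1) - (-clearance)).toNat (-clearance) (clearance + 1) rfl s
        have hmax : max (c.1 + -clearance) 0 = max 0 (c.1 - clearance) := by omega
        have hmin : min (c.1 + (clearance + 1)) grid_w = min grid_w (c.1 + clearance + 1) := by omega
        rw [hmax, hmin] at this
        exact this
    _ = _ := by
        induction PySem.List.pyRange (max 0 (c.1 - clearance)) (min grid_w (c.1 + clearance + 1)) 1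
            generalizing s with
        | nil => rfl
        | cons nx rest ih =>
            simp only [List.flatMap_cons, List.foldl_cons, List.foldl_append, List.foldl_map]
            exact ih _

-- A equals Set.ofList of the flat list of clamped per-cell blocks.
theorem A_eq_ofList (raw_blocked : List (Int × Int)) (clearance grid_w grid_h : Int) :
    inflate_blocked raw_blocked clearance grid_w grid_h
      = PySem.Set.ofList (raw_blocked.flatMap (fun c =>
          (PySem.List.pyRange (max 0 (c.1 - clearance)) (min grid_w (c.1 + clearance + 1)) 1).flatMap
            (fun nx => (PySem.List.pyRange (max 0 (c.2 - clearance)) (min grid_h (c.2 + clearance + 1)) 1).map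
              (fun ny => (nx, ny))))) := by
  unfold inflate_blocked
  rw [PySem.Set.ofList_eq_foldl]
  induction raw_blocked using List.reverseRecOn with
  | nil => rfl
  | append_singleton xs c ih =>
      simp only [List.foldl_append, List.flatMap_append, List.flatMap_cons, List.flatMap_nil,
        List.append_nil, List.foldl_cons, List.foldl_nil]
      rw [ih, cell_eq]

-- Folding Set.add over a list of already-present elements changes nothing.
theorem foldl_add_absorb {α : Type} [BEq α] [LawfulBEq α] (M : List α) :
    ∀ (s : PySem.Set α), (∀ y ∈ M, y ∈ s) → M.foldl PySem.Set.add s = s := by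
  induction M with
  | nil => intro s _; rfl
  | cons x xs ih =>
      intro s h
      simp only [List.foldl_cons]
      rw [PySem.Set.add_of_mem (h x (by simp))]
      exact ih s (fun y hy => h y (by simp [hy]))

-- A nested fold of inner Set.add-folds is the fold over the flattened list.
theorem foldl_foldl_add {α β : Type} [BEq β] [LawfulBEq β] (g : α → List β) (L : List α) :
    ∀ (s : PySem.Set β),
      L.foldl (fun s x => (g x).foldl PySem.Set.add s) s = (L.flatMap g).foldl PySem.Set.add s := by
  induction L with
  | nil => intro s; rfl
  | cons x xs ih =>
      intro s
      simp only [List.foldl_cons, List.flatMap_cons, List.foldl_append]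
      exact ih _

-- Deduplicating the generator list before flatMap does not change the resulting set:
-- a dropped duplicate's whole block already occurred earlier and is absorbed.
theorem ofList_flatMap_ofList {α β : Type} [BEq α] [LawfulBEq α] [BEq β] [LawfulBEq β]
    (f : α → List β) (L : List α) :
    PySem.Set.ofList (((PySem.Set.ofList L : List α)).flatMap f)
      = PySem.Set.ofList (L.flatMap f) := by
  induction L using List.reverseRecOn with
  | nil => rfl
  | append_singleton xs x ih =>
      rw [PySem.Set.ofList_append_singleton, List.flatMap_append, List.flatMap_cons,
        List.flatMap_nil, List.append_nil]
      by_cases hx : x ∈ PySem.Set.ofList xs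
      · rw [PySem.Set.add_of_mem hx, ih]
        have hr : PySem.Set.ofList (xs.flatMap f ++ f x) = PySem.Set.ofList (xs.flatMap f) := by
          rw [PySem.Set.ofList_eq_foldl (xs.flatMap f ++ f x), List.foldl_append,
            ← PySem.Set.ofList_eq_foldl]
          refine foldl_add_absorb (f x) _ (fun y hy => ?_)
          rw [PySem.Set.mem_ofList] at hx ⊢
          exact List.mem_flatMap.mpr ⟨x, hx, hy⟩
        rw [hr]
      · rw [PySem.Set.add_of_not_mem hx, List.flatMap_append, List.flatMap_cons,
          List.flatMap_nil, List.append_nil, PySem.Set.ofList_append, ih,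
          ← PySem.Set.ofList_append]

-- B equals Set.ofList of the deduplicated column seeds expanded along y.
theorem B_eq_ofList (raw_blocked : List (Int × Int)) (clearance grid_w grid_h : Int) :
    inflate_blocked_alt raw_blocked clearance grid_w grid_h
      = PySem.Set.ofList (((PySem.Set.ofList (raw_blocked.flatMap (fun c =>
          (PySem.List.pyRange (max 0 (c.1 - clearance)) (min grid_w (c.1 + clearance + 1)) 1).map
            (fun nx => (nx, c.2)))) : List (Int × Int))).flatMap (fun p =>
          (PySem.List.pyRange (max 0 (p.2 - clearance)) (min grid_h (p.2 + clearance + 1)) 1).map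
            (fun ny => (p.1, ny)))) := by
  unfold inflate_blocked_alt
  have hstage : ∀ (g : (Int × Int) → Int → (Int × Int)) (rng : (Int × Int) → List Int)
      (L : List (Int × Int)) (s : PySem.Set (Int × Int)),
      L.foldl (fun s c => (rng c).foldl (fun s v => PySem.Set.add s (g c v)) s) s
        = (L.flatMap (fun c => (rng c).map (g c))).foldl PySem.Set.add s := by
    intro g rng L s
    rw [← foldl_foldl_add (fun c => (rng c).map (g c)) L s]
    apply PySem.List.foldl_congr_mem
    intro acc c _
    rw [List.foldl_map]
  rw [hstage (fun c nx => (nx, c.2))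
      (fun c => PySem.List.pyRange (max 0 (c.1 - clearance)) (min grid_w (c.1 + clearance + 1)) 1)]
  rw [hstage (fun p ny => (p.1, ny))
      (fun p => PySem.List.pyRange (max 0 (p.2 - clearance)) (min grid_h (p.2 + clearance + 1)) 1)]
  simp only [PySem.Set.empty, ← PySem.Set.ofList_eq_foldl]

theorem main_eq (raw_blocked : List (Int × Int)) (clearance grid_w grid_h : Int) :
    inflate_blocked raw_blocked clearance grid_w grid_h
      = inflate_blocked_alt raw_blocked clearance grid_w grid_h := by
  rw [A_eq_ofList, B_eq_ofList, ofList_flatMap_ofList]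
  congr 1
  rw [List.flatMap_assoc]
  congr 1
  funext c
  rw [List.flatMap_map]

-- ===== VERDICT (by name: the statement is the Claim_ definition above) =====
theorem inflate_blocked_spec : Claim_equal_inflate_blocked := by
  intro raw_blocked clearance grid_w grid_h _
  exact main_eq raw_blocked clearance grid_w grid_h
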